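-- pv_equiv track=rewrite | github.com/Stavitskii/HWS | 06_1HW/carpet.py | carpet_string_ends
-- ===== SOURCE A (Python) =====
-- def carpet_string_ends(arg):
--     result = ""
--     length = range(arg)
--     for i in length:
--         if i == 0:
--             result += "▓"
--         elif i>0 and i<(len(length)-1):
--             result+= "░"
--         else:
--             result+="▓"
--     return result
-- ===== SOURCE B (Python) =====
-- def carpet_string_ends(arg):
--     n = max(arg, 0)
--     if n == 0:
--         return ""
--     if n == 1:
--         return "\u2593"
--     return "\u2593" + "\u2591" * (n - 2) + "\u2593"
-- ===== Notes on version B (the rewrite author's own statement) =====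
-- stated objective: simpler
-- what changed: Replaces the per-index loop with per-character branch tests by a closed-form construction: the string is built at once as an end char, a repeated middle block, and an end char.
import Mathlib
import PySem

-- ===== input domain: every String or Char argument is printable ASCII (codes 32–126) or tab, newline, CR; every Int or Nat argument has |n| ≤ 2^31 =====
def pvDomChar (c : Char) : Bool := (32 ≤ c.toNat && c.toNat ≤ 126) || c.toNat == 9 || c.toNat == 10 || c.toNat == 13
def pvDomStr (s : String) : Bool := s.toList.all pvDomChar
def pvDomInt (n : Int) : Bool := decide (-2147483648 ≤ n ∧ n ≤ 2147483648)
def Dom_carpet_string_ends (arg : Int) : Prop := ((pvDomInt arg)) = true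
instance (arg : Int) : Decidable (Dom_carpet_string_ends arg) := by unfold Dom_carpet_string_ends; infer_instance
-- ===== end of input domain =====

-- B builds the string in closed form ("▓", repeated "░" middle, "▓") instead of A's per-index loop; objective: simpler.

-- ===== PORT A =====
def carpet_string_ends (arg : Int) : String :=
  let length := PySem.List.pyRange 0 arg 1
  length.foldl (fun result i =>
    if i = 0 then result ++ "▓"
    else if 0 < i ∧ i < ((length.length : Int) - 1) then result ++ "░"
    else result ++ "▓") ""

-- ===== PORT B =====
def carpet_string_ends_alt (arg : Int) : String :=
  let n : Int := max arg 0
  if n = 0 then ""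
  else if n = 1 then "▓"
  else "▓" ++ String.ofList (List.replicate (n - 2).toNat '░') ++ "▓"

-- ===== PRECONDITION & SPEC =====
def Spec_carpet_string_ends (arg : Int) (out : String) : Prop := out = carpet_string_ends_alt arg
instance (arg : Int) (out : String) : Decidable (Spec_carpet_string_ends arg out) := by unfold Spec_carpet_string_ends; infer_instance

-- ===== CLAIM (what is proved, stated in full; the proofs are below) =====
def Claim_equal_carpet_string_ends : Prop := ∀ (arg : Int), Dom_carpet_string_ends arg → Spec_carpet_string_ends arg (carpet_string_ends arg)

-- ===== LEMMAS AND PROOFS =====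

-- the loop body of A, with the (constant) value of len(length) abstracted as N
def pvBody (N : Int) (result : String) (i : Int) : String :=
  if i = 0 then result ++ "▓"
  else if 0 < i ∧ i < (N - 1) then result ++ "░"
  else result ++ "▓"

theorem pvMkAppend (a b : List Char) : String.ofList a ++ String.ofList b = String.ofList (a ++ b) := by simp

-- invariant: a strict prefix of the loop (1 ≤ n indices, all below N-1) yields "▓" ++ (n-1) fillers
theorem pvPrefix (N : Int) (n : Nat) (h1 : 1 ≤ n) (h2 : (n : Int) ≤ N - 1) :
    (PySem.List.pyRange 0 n 1).foldl (pvBody N) "" = String.ofList ('▓' :: List.replicate (n - 1) '░') := by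
  induction n with
  | zero => omega
  | succ m ih =>
    rcases Nat.eq_or_lt_of_le h1 with h | h
    · -- m + 1 = 1
      have hm : m = 0 := by omega
      subst hm
      simp
      rfl
    · have hm1 : 1 ≤ m := by omega
      have hsplit : PySem.List.pyRange 0 ((m : Int) + 1) 1
          = PySem.List.pyRange 0 m 1 ++ [(m : Int)] := by
        have := PySem.List.pyRange_one_succ_right (a := 0) (b := (m : Int)) (by exact_mod_cast Nat.zero_le m)
        simpa using this
      rw [show ((m + 1 : Nat) : Int) = (m : Int) + 1 by push_cast; ring] at h2 ⊢
      rw [hsplit, List.foldl_append, ih hm1 (by omega)]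
      have hmne : (m : Int) ≠ 0 := by omega
      simp only [List.foldl, pvBody, if_neg hmne]
      rw [if_pos ⟨by exact_mod_cast hm1, by omega⟩]
      show String.ofList ('▓' :: List.replicate (m - 1) '░') ++ String.ofList ['░'] = _
      rw [pvMkAppend]
      congr 1
      show '▓' :: (List.replicate (m - 1) '░' ++ ['░']) = '▓' :: List.replicate (m + 1 - 1) '░'
      rw [← List.replicate_succ']
      have hmm : m - 1 + 1 = m + 1 - 1 := by omega
      rw [hmm]

theorem carpet_string_ends_eq_alt (arg : Int) : carpet_string_ends arg = carpet_string_ends_alt arg := by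
  unfold carpet_string_ends carpet_string_ends_alt
  by_cases h0 : arg ≤ 0
  · rw [PySem.List.pyRange_one_eq_nil h0]
    simp [max_eq_right h0]
  · replace h0 : 0 < arg := lt_of_not_ge h0
    have hfold : (PySem.List.pyRange 0 arg 1).foldl (pvBody arg) ""
        = carpet_string_ends_alt arg := by
      by_cases h1 : arg = 1
      · subst h1
        simp [carpet_string_ends_alt]
        rfl
      · have h2 : 2 ≤ arg := by omega
        have hsplit : PySem.List.pyRange 0 arg 1
            = PySem.List.pyRange 0 (arg - 1) 1 ++ [arg - 1] := by
          have := PySem.List.pyRange_one_succ_right (a := 0) (b := arg - 1) (by omega)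
          simpa using this
        rw [hsplit, List.foldl_append]
        have hn : ((arg - 1).toNat : Int) = arg - 1 := by omega
        have := pvPrefix arg (arg - 1).toNat (by omega) (by omega)
        rw [hn] at this
        rw [this]
        have hne : arg - 1 ≠ 0 := by omega
        simp only [List.foldl, pvBody, if_neg hne]
        rw [if_neg (by intro ⟨_, hlt⟩; omega)]
        unfold carpet_string_ends_alt
        rw [show max arg 0 = arg from max_eq_left (by omega)]
        rw [if_neg (by omega), if_neg h1]
        show String.ofList ('▓' :: List.replicate ((arg - 1).toNat - 1) '░') ++ String.ofList ['▓'] = _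
        rw [pvMkAppend]
        show _ = String.ofList ['▓'] ++ String.ofList (List.replicate (arg - 2).toNat '░') ++ String.ofList ['▓']
        rw [pvMkAppend, pvMkAppend]
        congr 1
        simp
        omega
    calc (PySem.List.pyRange 0 arg 1).foldl
          (fun result i => if i = 0 then result ++ "▓"
            else if 0 < i ∧ i < (((PySem.List.pyRange 0 arg 1).length : Int) - 1) then result ++ "░"
            else result ++ "▓") ""
        = (PySem.List.pyRange 0 arg 1).foldl (pvBody arg) "" := by
          apply PySem.List.foldl_congr_mem
          intro res i _
          simp [pvBody, PySem.List.length_pyRange_one, max_eq_left h0.le]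
      _ = carpet_string_ends_alt arg := hfold

-- ===== VERDICT (by name: the statement is the Claim_ definition above) =====
theorem carpet_string_ends_spec : Claim_equal_carpet_string_ends := by
  intro arg _
  exact carpet_string_ends_eq_alt arg
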